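-- pv_equiv track=rewrite | github.com/mgard/epater | instruction.py | immediateToBytecode
-- ===== SOURCE A (Python) =====
-- def immediateToBytecode(imm, mode=None, alreadyinverted=False):
--     """
--     The immediate operand rotate field is a 4 bit unsigned integer which specifies a shift
--     operation on the 8 bit immediate value. This value is zero extended to 32 bits, and then
--     subject to a rotate right by twice the value in the rotate field. (ARM datasheet, 4.5.3)
--     :param imm:
--     :return:
--     """
--     def tryInvert():
--         if mode is None:
--             return None
--         if mode == 'logical':
--             invimm = (~imm) & 0xFFFFFFFF
--         elif mode == 'arithmetic':
--             invimm = (~imm + 1) & 0xFFFFFFFF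
--         ret2 = immediateToBytecode(invimm, mode, True)
--         if ret2:
--             return ret2[0], ret2[1], True
--         return None
--
--     imm &= 0xFFFFFFFF
--     if imm == 0:
--         return 0, 0, False
--     if imm < 256:
--         return imm, 0, False
--
--     if imm < 0:
--         if alreadyinverted:
--             return None
--         return tryInvert()
--
--     def _rotLeftPos(onep, n):
--         return [(k+n) % 32 for k in onep]
--
--     def _rotLeftBin(binlist, n):
--         return binlist[n:] + binlist[:n]
--
--     immBin = [int(b) for b in "{:032b}".format(imm)]
--     onesPos = [31-i for i in range(len(immBin)) if immBin[i] == 1]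
--     for i in range(31):
--         rotatedPos = _rotLeftPos(onesPos, i)
--         if max(rotatedPos) < 8:
--             # Does it fit in 8 bits?
--             # If so, we want to use the put the constant to the far left of the unsigned field
--             # (that is, we want as many rotations as possible)
--             # Remember that we can only do an EVEN number of right rotations
--             rotReal = i + (7 - max(rotatedPos))
--             if rotReal % 2 == 1:
--                 if max(rotatedPos) < 7:
--                     rotReal -= 1
--                 else:
--                     return None
--             immBinRot = [str(b) for b in _rotLeftBin(immBin, rotReal)]
--             val = int("".join(immBinRot), 2) & 0xFF
--             rot = rotReal // 2
--             break
--     else: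
--         if alreadyinverted:
--             return None
--         return tryInvert()
--     return val, rot, False
-- ===== SOURCE B (Python) =====
-- def immediateToBytecode(imm, mode=None, alreadyinverted=False):
--     imm &= 0xFFFFFFFF
--     if imm == 0:
--         return 0, 0, False
--     if imm < 256:
--         return imm, 0, False
--     # largest even right-rotation count whose rotation leaves an 8-bit value
--     for rotReal in range(30, -1, -2):
--         val = ((imm << rotReal) | (imm >> (32 - rotReal))) & 0xFFFFFFFF
--         if val < 256:
--             return val, rotReal // 2, False
--     if alreadyinverted:
--         return None
--     # not directly encodable: try the inverted constant (MVN / negated form)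
--     if mode == 'logical':
--         inv = ~imm & 0xFFFFFFFF
--     elif mode == 'arithmetic':
--         inv = -imm & 0xFFFFFFFF
--     else:
--         return None
--     ret2 = immediateToBytecode(inv, mode, True)
--     if ret2:
--         return ret2[0], ret2[1], True
--     return None
-- ===== Notes on version B (the rewrite author's own statement) =====
-- stated objective: simpler
-- what changed: A formats the immediate as a 32-character binary string, tracks set-bit positions in lists and rotates bit lists to find the encoding; B drops all list machinery and scans even rotation counts downward with direct integer rotate arithmetic, falling back to the inverted constant when no rotation fits (Pre_ excludes only the inputs where A raises UnboundLocalError: an unrecognised mode string with a not-directly-encodable immediate).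
import Mathlib
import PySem

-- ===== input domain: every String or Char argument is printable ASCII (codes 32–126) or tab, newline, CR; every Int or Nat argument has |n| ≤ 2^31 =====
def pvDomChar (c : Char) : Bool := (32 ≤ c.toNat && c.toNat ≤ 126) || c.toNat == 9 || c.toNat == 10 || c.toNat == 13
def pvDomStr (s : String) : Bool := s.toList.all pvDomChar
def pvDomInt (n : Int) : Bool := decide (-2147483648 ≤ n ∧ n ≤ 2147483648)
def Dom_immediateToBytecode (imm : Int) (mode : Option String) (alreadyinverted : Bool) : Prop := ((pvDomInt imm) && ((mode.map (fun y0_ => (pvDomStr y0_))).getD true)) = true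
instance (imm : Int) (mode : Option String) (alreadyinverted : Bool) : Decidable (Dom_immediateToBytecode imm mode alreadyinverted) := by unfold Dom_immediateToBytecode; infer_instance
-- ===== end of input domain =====

-- B replaces A's binary-string/bit-position-list search by direct rotation arithmetic scanning
-- even rotation counts downward, falling back to the inverted constant (objective: simpler);
-- return values proved equal on Pre_.

-- ===== PORT A =====

-- 'x & 0xFFFFFFFF' : Python '&' with a power-of-two mask is '%' (exact for every int)
def pyMask32 (x : Int) : Int := PySem.Int.mod x 4294967296

-- '[int(b) for b in "{:032b}".format(imm)]' : 32 binary digits, most significant first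
-- (exact for 0 ≤ imm < 2^32, which the mask guarantees)
def pyBin32 (imm : Int) : List Int :=
  (List.range 32).map (fun i => PySem.Int.mod (PySem.Int.floordiv imm ((2 : Int) ^ (31 - i))) 2)

-- '[31-i for i in range(len(immBin)) if immBin[i] == 1]'
def pyOnesPos (immBin : List Int) : List Int :=
  ((List.range immBin.length).filter
      (fun i => PySem.List.pyGetD immBin (Int.ofNat i) 0 == 1)).map (fun i => 31 - (Int.ofNat i))

-- '_rotLeftPos(onep, n) = [(k+n) % 32 for k in onep]'
def pyRotLeftPos (onep : List Int) (n : Int) : List Int :=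
  onep.map (fun k => PySem.Int.mod (k + n) 32)

-- '_rotLeftBin(binlist, n) = binlist[n:] + binlist[:n]'
def pyRotLeftBin (binlist : List Int) (n : Int) : List Int :=
  PySem.List.slice binlist (some n) none ++ PySem.List.slice binlist none (some n)

-- 'int("".join(immBinRot), 2)' on a list of 0/1 digits: positional fold
def pyBits2Int (bits : List Int) : Int := bits.foldl (fun acc b => acc * 2 + b) 0

-- one iteration of 'for i in range(31)'; state none = keep looping,
-- some (inl (val, rot)) = 'break' with val/rot set, some (inr ()) = 'return None'
def aStep (onesPos immBin : List Int) (st : Option (Sum (Int × Int) Unit)) (i : Nat) :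
    Option (Sum (Int × Int) Unit) :=
  match st with
  | some r => some r
  | none =>
    let rotatedPos := pyRotLeftPos onesPos (i : Int)
    match PySem.List.max? rotatedPos (fun x => x) with
    | none => none     -- Python max([]) raises; unreachable here (imm ≥ 256 has a set bit)
    | some mx =>
      if mx < 8 then
        let brk := fun (rotReal : Int) =>
          let immBinRot := pyRotLeftBin immBin rotReal
          let val := PySem.Int.mod (pyBits2Int immBinRot) 256   -- '& 0xFF' on a nonnegative int
          some (Sum.inl (val, PySem.Int.floordiv rotReal 2))
        let rotReal : Int := (i : Int) + (7 - mx)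
        if PySem.Int.mod rotReal 2 == 1 then
          if mx < 7 then brk (rotReal - 1) else some (Sum.inr ())
        else brk rotReal
      else none

-- tryInvert with the recursive call passed in (Python closure over imm/mode)
def pyTryInvertGo (rec : Int → Option String → Option (Int × Int × Bool))
    (imm : Int) (mode : Option String) : Option (Int × Int × Bool) :=
  match mode with
  | none => none
  | some m =>
    if m == "logical" then
      let invimm := pyMask32 (-imm - 1)            -- '(~imm) & 0xFFFFFFFF'
      match rec invimm mode with
      | some (a, b, _) => some (a, b, true)        -- 'if ret2:' — a 3-tuple is always truthy
      | none => none
    else if m == "arithmetic" then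
      let invimm := pyMask32 (-imm)                -- '(~imm + 1) & 0xFFFFFFFF'
      match rec invimm mode with
      | some (a, b, _) => some (a, b, true)
      | none => none
    else none    -- Python raises UnboundLocalError here (excluded by Pre_)

-- the recursion is at most 2 deep (tryInvert calls back with alreadyinverted=True,
-- which never calls tryInvert again), so a fuel of 2 is never exhausted
def immediateToBytecodeGo : Nat → Int → Option String → Bool → Option (Int × Int × Bool)
  | 0, _, _, _ => none
  | fuel + 1, imm, mode, alreadyinverted =>
    let imm := pyMask32 imm                    -- imm &= 0xFFFFFFFF
    if imm == 0 then some (0, 0, false)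
    else if imm < 256 then some (imm, 0, false)
    else if imm < 0 then                       -- dead after masking; kept for fidelity
      (if alreadyinverted then none
       else pyTryInvertGo (fun i m => immediateToBytecodeGo fuel i m true) imm mode)
    else
      let immBin := pyBin32 imm
      let onesPos := pyOnesPos immBin
      match (List.range 31).foldl (aStep onesPos immBin) none with
      | some (Sum.inl (val, rot)) => some (val, rot, false)
      | some (Sum.inr _) => none
      | none =>
        if alreadyinverted then none
        else pyTryInvertGo (fun i m => immediateToBytecodeGo fuel i m true) imm mode

def immediateToBytecode (imm : Int) (mode : Option String) (alreadyinverted : Bool) :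
    Option (Int × Int × Bool) :=
  immediateToBytecodeGo 2 imm mode alreadyinverted

-- ===== PORT B =====

-- right-rotation of a 32-bit value by r (Source B: ((imm << r) | (imm >> (32 - r))) & 0xFFFFFFFF)
def rot32 (x r : Nat) : Nat := (x <<< r ||| x >>> (32 - r)) &&& 4294967295

-- recursion depth is at most 2 (the inverted retry passes alreadyinverted=True); fuel 2 suffices
def altGo : Nat → Int → Option String → Bool → Option (Int × Int × Bool)
  | 0, _, _, _ => none
  | fuel + 1, imm, mode, alreadyinverted =>
    let n : Nat := (imm % 4294967296).toNat    -- imm &= 0xFFFFFFFF (Int '%' = Python '%' for a positive modulus; the result is a nonnegative 32-bit value)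
    if n == 0 then some (0, 0, false)
    else if n < 256 then some ((n : Int), 0, false)
    else
      -- 'for rotReal in range(30, -1, -2)': rotReal = 30 - 2*k for k = 0..15, first hit returns
      match (List.range 16).findSome? (fun k =>
          let rotReal := 30 - 2 * k
          let val := rot32 n rotReal
          if val < 256 then some ((val : Int), ((rotReal / 2 : Nat) : Int), false) else none) with
      | some res => some res
      | none =>
        if alreadyinverted then none
        else
          match (if mode == some "logical" then some (4294967295 - n)        -- '~imm & 0xFFFFFFFF'
                 else if mode == some "arithmetic" then some (4294967296 - n) -- '-imm & 0xFFFFFFFF' (0 < n here)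
                 else none) with
          | none => none
          | some inv =>
            match altGo fuel ((inv : Nat) : Int) mode true with
            | some t => some (t.1, t.2.1, true)
            | none => none

def immediateToBytecode_alt (imm : Int) (mode : Option String) (alreadyinverted : Bool) :
    Option (Int × Int × Bool) :=
  altGo 2 imm mode alreadyinverted

-- ===== PRECONDITION & SPEC =====
-- Pre_ excludes exactly the inputs on which Python A raises UnboundLocalError: a mode other
-- than None/'logical'/'arithmetic' together with a not-yet-inverted, not directly encodable
-- immediate (masked value ≥ 256 admitting no 8-bit value under the 31 rotations A tries),
-- which makes A call tryInvert with neither branch assigning invimm.  A returns on every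
-- other input, and all of those are admitted.
def Pre_immediateToBytecode (imm : Int) (mode : Option String) (alreadyinverted : Bool) : Prop :=
  mode = none ∨ mode = some "logical" ∨ mode = some "arithmetic" ∨ alreadyinverted = true
  ∨ imm % 4294967296 < 256
  ∨ ((List.range 31).any (fun r =>
        decide ((((imm % 4294967296).toNat <<< r ||| (imm % 4294967296).toNat >>> (32 - r)) &&& 4294967295) < 256))) = true
instance (imm : Int) (mode : Option String) (alreadyinverted : Bool) : Decidable (Pre_immediateToBytecode imm mode alreadyinverted) := by unfold Pre_immediateToBytecode; infer_instance

def pvWitness_immediateToBytecode : Int × Option String × Bool := (3841, some "logical", false)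

def Spec_immediateToBytecode (imm : Int) (mode : Option String) (alreadyinverted : Bool) (out : Option (Int × Int × Bool)) : Prop := out = immediateToBytecode_alt imm mode alreadyinverted
instance (imm : Int) (mode : Option String) (alreadyinverted : Bool) (out : Option (Int × Int × Bool)) : Decidable (Spec_immediateToBytecode imm mode alreadyinverted out) := by unfold Spec_immediateToBytecode; infer_instance

-- ===== CLAIM (what is proved, stated in full; the proofs are below) =====
def Claim_equal_immediateToBytecode : Prop := ∀ (imm : Int) (mode : Option String) (alreadyinverted : Bool), Dom_immediateToBytecode imm mode alreadyinverted → Pre_immediateToBytecode imm mode alreadyinverted → Spec_immediateToBytecode imm mode alreadyinverted (immediateToBytecode imm mode alreadyinverted)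
-- ===== LEMMAS AND PROOFS =====

def fitsB (n r : Nat) : Prop := ∀ p, p < 32 → n.testBit p = true → (p + r) % 32 < 8

theorem lt_pow_of_bits (m k : Nat) (h : ∀ j, k ≤ j → m.testBit j = false) : m < 2 ^ k := by
  have hd : m / 2 ^ k = 0 := by
    refine Nat.eq_of_testBit_eq (fun i => ?_)
    have : (m / 2 ^ k).testBit i = m.testBit (k + i) := by
      simp [Nat.testBit_div_two_pow, Nat.add_comm]
    rw [this, h _ (by omega), Nat.zero_testBit]
  exact Nat.lt_of_div_eq_zero (Nat.two_pow_pos k) hd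

theorem rot32_le (x r : Nat) : rot32 x r ≤ 4294967295 := Nat.and_le_right

theorem testBit_rot32 {n r q : Nat} (h2 : n < 2 ^ 32) (hr : r ≤ 31) (hq : q < 32) :
    (rot32 n r).testBit q = n.testBit ((q + 32 - r) % 32) := by
  have hmask : (4294967295 : Nat) = 2 ^ 32 - 1 := by norm_num
  unfold rot32
  rw [Nat.testBit_and, Nat.testBit_or, Nat.testBit_shiftLeft, Nat.testBit_shiftRight,
    hmask, Nat.testBit_two_pow_sub_one]
  by_cases hqr : r ≤ q
  · have h1 : (q + 32 - r) % 32 = q - r := by omega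
    have h2' : n.testBit (32 - r + q) = false :=
      Nat.testBit_lt_two_pow (lt_of_lt_of_le h2 (Nat.pow_le_pow_right (by omega) (by omega)))
    simp [h1, h2', hqr, hq]
  · have h1 : (q + 32 - r) % 32 = 32 - r + q := by omega
    simp [h1, hqr, hq]

theorem rot32_lt256_iff {n r : Nat} (h2 : n < 2 ^ 32) (hr : r ≤ 31) :
    rot32 n r < 256 ↔ fitsB n r := by
  constructor
  · intro hlt p hp hbit
    by_contra hge
    have hq : (p + r) % 32 < 32 := Nat.mod_lt _ (by omega)
    have hb := testBit_rot32 (q := (p + r) % 32) h2 hr hq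
    have hidx : ((p + r) % 32 + 32 - r) % 32 = p := by omega
    rw [hidx, hbit] at hb
    have : (rot32 n r).testBit ((p + r) % 32) = false :=
      Nat.testBit_lt_two_pow (lt_of_lt_of_le hlt (by
        have : (256 : Nat) = 2 ^ 8 := by norm_num
        rw [this]; exact Nat.pow_le_pow_right (by omega) (by omega)))
    rw [this] at hb
    exact Bool.false_ne_true hb
  · intro hf
    have h256 : (256 : Nat) = 2 ^ 8 := by norm_num
    rw [h256]
    refine lt_pow_of_bits _ 8 (fun j hj => ?_)
    by_cases hj32 : j < 32
    · rw [testBit_rot32 h2 hr hj32]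
      by_contra hbit
      have hbit' : n.testBit ((j + 32 - r) % 32) = true := by
        cases h : n.testBit ((j + 32 - r) % 32) <;> simp_all
      have hplt : (j + 32 - r) % 32 < 32 := Nat.mod_lt _ (by omega)
      have := hf _ hplt hbit'
      omega
    · exact Nat.testBit_lt_two_pow (lt_of_le_of_lt (rot32_le n r) (by
        calc (4294967295 : Nat) < 2 ^ 32 := by norm_num
        _ ≤ 2 ^ j := Nat.pow_le_pow_right (by omega) (by omega)))

theorem lt256_of_all_low {n : Nat} (h2 : n < 2 ^ 32)
    (h : ∀ p, p < 32 → n.testBit p = true → p < 8) : n < 256 := by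
  have h256 : (256 : Nat) = 2 ^ 8 := by norm_num
  rw [h256]
  refine lt_pow_of_bits _ 8 (fun j hj => ?_)
  by_cases hj32 : j < 32
  · by_contra hbit
    have hbit' : n.testBit j = true := by cases h' : n.testBit j <;> simp_all
    have := h _ hj32 hbit'
    omega
  · exact Nat.testBit_lt_two_pow (lt_of_lt_of_le h2 (Nat.pow_le_pow_right (by omega) (by omega)))

theorem contig {n r1 r r2 : Nat} (h256 : 256 ≤ n) (h2 : n < 2 ^ 32)
    (hf1 : fitsB n r1) (hf2 : fitsB n r2) (h1r : r1 ≤ r) (hrr : r ≤ r2) (hb : r2 ≤ 31) :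
    fitsB n r := by
  have hr1pos : 1 ≤ r1 := by
    by_contra h0
    have : r1 = 0 := by omega
    subst this
    have : n < 256 := lt256_of_all_low h2 (fun p hp hbit => by
      have := hf1 p hp hbit; omega)
    omega
  by_cases hwrap : ∃ p, p < 32 ∧ n.testBit p = true ∧ 32 ≤ (p + r1) % 32 + (r2 - r1)
  · exfalso
    obtain ⟨ps, hps, hbs, hws⟩ := hwrap
    have has := hf1 ps hps hbs
    have hd2 : 25 ≤ r2 - r1 := by omega
    have : n < 256 := lt256_of_all_low h2 (fun p hp hbit => by
      have ha1 := hf1 p hp hbit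
      have ha2 := hf2 p hp hbit
      omega)
    omega
  · intro p hp hbit
    have ha1 := hf1 p hp hbit
    have ha2 := hf2 p hp hbit
    have hnw : (p + r1) % 32 + (r2 - r1) ≤ 31 := by
      by_contra h
      exact hwrap ⟨p, hp, hbit, by omega⟩
    omega

theorem pyBin32_natCast (n : Nat) :
    pyBin32 (n : Int) = (List.range 32).map (fun i => ((n / 2 ^ (31 - i) % 2 : Nat) : Int)) := by
  unfold pyBin32
  refine List.map_congr_left (fun i hi => ?_)
  have hp : ((2 : Int) ^ (31 - i)) = ((2 ^ (31 - i) : Nat) : Int) := by push_cast; ring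
  rw [hp, PySem.Int.floordiv_natCast]
  exact_mod_cast PySem.Int.mod_natCast (n / 2 ^ (31 - i)) 2

theorem length_pyBin32 (n : Nat) : (pyBin32 (n : Int)).length = 32 := by
  rw [pyBin32_natCast]; simp

theorem pyGetD_bin32 (n i : Nat) (hi : i < 32) :
    PySem.List.pyGetD (pyBin32 (n : Int)) (i : Int) 0 = ((n / 2 ^ (31 - i) % 2 : Nat) : Int) := by
  rw [pyBin32_natCast, PySem.List.pyGetD_eq_getElem] <;> simp [hi]

theorem mem_onesPos {n : Nat} {x : Int} :
    x ∈ pyOnesPos (pyBin32 (n : Int)) ↔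
      ∃ p : Nat, p < 32 ∧ n.testBit p = true ∧ x = (p : Int) := by
  unfold pyOnesPos
  rw [length_pyBin32]
  simp only [List.mem_map, List.mem_filter, List.mem_range]
  constructor
  · rintro ⟨i, ⟨hi, hg⟩, hx⟩
    rw [show (Int.ofNat i) = ((i : Nat) : Int) from rfl, pyGetD_bin32 n i hi] at hg
    simp only [Int.ofNat_eq_natCast] at hx
    refine ⟨31 - i, by omega, ?_, by omega⟩
    rw [Nat.testBit_eq_decide_div_mod_eq]
    simp only [beq_iff_eq] at hg
    have : n / 2 ^ (31 - i) % 2 = 1 := by exact_mod_cast hg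
    simp [this]
  · rintro ⟨p, hp, hbit, hx⟩
    refine ⟨31 - p, ⟨by omega, ?_⟩, by subst hx; simp [Int.ofNat_eq_natCast]; omega⟩
    rw [show (Int.ofNat (31 - p)) = (((31 - p : Nat)) : Int) from rfl, pyGetD_bin32 n (31 - p) (by omega)]
    rw [Nat.testBit_eq_decide_div_mod_eq] at hbit
    have h31 : 31 - (31 - p) = p := by omega
    rw [h31]
    simp only [decide_eq_true_eq] at hbit
    simp [hbit]

theorem bits2int_aux (m : Nat) :
    ∀ (k : Nat) (c : Int),
      ((List.range k).map (fun i => ((m / 2 ^ (k - 1 - i) % 2 : Nat) : Int))).foldl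
          (fun acc b => acc * 2 + b) c = c * 2 ^ k + ((m % 2 ^ k : Nat) : Int) := by
  intro k
  induction k with
  | zero => intro c; simp
  | succ k ih =>
    intro c
    have hsplit : (List.range (k + 1)).map (fun i => ((m / 2 ^ (k + 1 - 1 - i) % 2 : Nat) : Int)) =
        ((m / 2 ^ k % 2 : Nat) : Int) ::
          (List.range k).map (fun i => ((m / 2 ^ (k - 1 - i) % 2 : Nat) : Int)) := by
      rw [List.range_succ_eq_map, List.map_cons, List.map_map]
      refine congrArg₂ _ (by simp) (List.map_congr_left (fun i hi => ?_))
      simp only [Function.comp_apply]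
      have h : k + 1 - 1 - i.succ = k - 1 - i := by omega
      rw [h]
    rw [hsplit, List.foldl_cons, ih]
    have hmp : m % 2 ^ (k + 1) = m % 2 ^ k + 2 ^ k * (m / 2 ^ k % 2) := Nat.mod_pow_succ
    rw [hmp]
    push_cast
    ring

theorem bits2int_bin32 (m : Nat) (hm : m < 2 ^ 32) :
    pyBits2Int (pyBin32 (m : Int)) = (m : Int) := by
  unfold pyBits2Int
  rw [pyBin32_natCast]
  have := bits2int_aux m 32 0
  rw [this]
  rw [Nat.mod_eq_of_lt hm]
  ring

theorem rot32_lt_two_pow (x r : Nat) : rot32 x r < 2 ^ 32 :=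
  lt_of_le_of_lt (rot32_le x r) (by norm_num)

theorem rotbin {n : Nat} (h2 : n < 2 ^ 32) {R : Nat} (hR : R ≤ 31) :
    pyRotLeftBin (pyBin32 (n : Int)) (R : Int) = pyBin32 ((rot32 n R : Nat) : Int) := by
  unfold pyRotLeftBin
  rw [PySem.List.slice_from_natCast, PySem.List.slice_to_natCast]
  rw [pyBin32_natCast, pyBin32_natCast]
  refine List.ext_getElem (by simp; omega) (fun i h1 h2' => ?_)
  have hi32 : i < 32 := by simpa using h2'
  have hlen : ((List.range 32).map (fun i => ((n / 2 ^ (31 - i) % 2 : Nat) : Int))).length = 32 := by simp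
  rw [List.getElem_append]
  have hdl : (((List.range 32).map (fun i => ((n / 2 ^ (31 - i) % 2 : Nat) : Int))).drop R).length = 32 - R := by simp
  by_cases hc : i < 32 - R
  · rw [dif_pos (by omega)]
    rw [List.getElem_drop, List.getElem_map, List.getElem_range, List.getElem_map, List.getElem_range]
    have hq : (31 - i : Nat) < 32 := by omega
    have hb := testBit_rot32 (n := n) (r := R) (q := 31 - i) h2 hR hq
    have hidx : (31 - i + 32 - R) % 32 = 31 - (R + i) := by omega
    rw [hidx] at hb
    rw [Nat.testBit_eq_decide_div_mod_eq, Nat.testBit_eq_decide_div_mod_eq] at hb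
    have h1' := Nat.mod_two_eq_zero_or_one (rot32 n R / 2 ^ (31 - i))
    have h2'' := Nat.mod_two_eq_zero_or_one (n / 2 ^ (31 - (R + i)))
    have hiff := decide_eq_decide.mp hb
    rcases h1' with h1' | h1' <;> rcases h2'' with h2'' | h2'' <;>
      simp [h1', h2''] at hiff ⊢
  · rw [dif_neg (by omega)]
    rw [List.getElem_take, List.getElem_map, List.getElem_range, List.getElem_map, List.getElem_range]
    have hq : (31 - i : Nat) < 32 := by omega
    have hb := testBit_rot32 (n := n) (r := R) (q := 31 - i) h2 hR hq
    have hidx : (31 - i + 32 - R) % 32 = 31 - (i - (32 - R)) := by omega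
    rw [hidx] at hb
    rw [Nat.testBit_eq_decide_div_mod_eq, Nat.testBit_eq_decide_div_mod_eq] at hb
    have h1' := Nat.mod_two_eq_zero_or_one (rot32 n R / 2 ^ (31 - i))
    have h2'' := Nat.mod_two_eq_zero_or_one (n / 2 ^ (31 - (i - (32 - R))))
    have hiff := decide_eq_decide.mp hb
    rcases h1' with h1' | h1' <;> rcases h2'' with h2'' | h2'' <;>
      simp [h1', h2''] at hiff ⊢

theorem val_eq {n : Nat} (h2 : n < 2 ^ 32) {R : Nat} (hR : R ≤ 31) (hfit : rot32 n R < 256) :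
    PySem.Int.mod (pyBits2Int (pyRotLeftBin (pyBin32 (n : Int)) (R : Int))) 256
      = ((rot32 n R : Nat) : Int) := by
  rw [rotbin h2 hR, bits2int_bin32 _ (rot32_lt_two_pow n R)]
  have := PySem.Int.mod_natCast (rot32 n R) 256
  rw [show ((256 : Nat) : Int) = (256 : Int) from rfl] at this
  rw [this, Nat.mod_eq_of_lt hfit]

-- the for-loop with break: foldl over an absorbing step is the first hit
theorem foldl_aStep_some (oP iB : List Int) :
    ∀ (l : List Nat) (r : Sum (Int × Int) Unit), l.foldl (aStep oP iB) (some r) = some r := by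
  intro l
  induction l with
  | nil => intro r; rfl
  | cons a t ih => intro r; simpa [aStep] using ih r

theorem foldl_aStep_eq (oP iB : List Int) :
    ∀ (l : List Nat), l.foldl (aStep oP iB) none = l.findSome? (fun i => aStep oP iB none i) := by
  intro l
  induction l with
  | nil => rfl
  | cons a t ih =>
    rw [List.foldl_cons, List.findSome?_cons]
    cases h : aStep oP iB none a with
    | none => simpa using ih
    | some r => simp [foldl_aStep_some]

theorem findSome?_range_none {β : Type} (f : Nat → Option β) (m : Nat)
    (h : ∀ j, j < m → f j = none) : (List.range m).findSome? f = none := by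
  induction m with
  | zero => rfl
  | succ k ih =>
    rw [List.range_succ, List.findSome?_append, ih (fun j hj => h j (by omega))]
    simp [h k (by omega)]

theorem findSome?_range_first {β : Type} (f : Nat → Option β) (m k : Nat) (v : β)
    (hk : k < m) (h0 : ∀ j, j < k → f j = none) (hk2 : f k = some v) :
    (List.range m).findSome? f = some v := by
  induction m with
  | zero => omega
  | succ t ih =>
    rw [List.range_succ, List.findSome?_append]
    by_cases hkt : k < t
    · rw [ih hkt]; rfl
    · have : k = t := by omega
      subst this
      rw [findSome?_range_none f k h0]
      simp [hk2]

theorem mem_rotated {n : Nat} {i p : Nat} (hp : p < 32) (hbit : n.testBit p = true) :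
    (((p + i) % 32 : Nat) : Int) ∈ pyRotLeftPos (pyOnesPos (pyBin32 (n : Int))) (i : Int) := by
  unfold pyRotLeftPos
  refine List.mem_map.mpr ⟨(p : Int), mem_onesPos.mpr ⟨p, hp, hbit, rfl⟩, ?_⟩
  have : ((p : Int) + (i : Int)) = (((p + i : Nat)) : Int) := by push_cast; ring
  rw [this]
  exact_mod_cast PySem.Int.mod_natCast (p + i) 32

theorem gA_none {n : Nat} (h256 : 256 ≤ n) (h2 : n < 2 ^ 32) {i : Nat} (hi : i ≤ 30)
    (hnf : ¬ rot32 n i < 256) :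
    aStep (pyOnesPos (pyBin32 (n : Int))) (pyBin32 (n : Int)) none i = none := by
  have hnfB : ¬ fitsB n i := fun hf => hnf ((rot32_lt256_iff h2 (by omega)).mpr hf)
  unfold fitsB at hnfB
  push_neg at hnfB
  obtain ⟨p, hp, hbit, hge⟩ := hnfB
  have hmem := mem_rotated (i := i) hp hbit
  cases hm : PySem.List.max? (pyRotLeftPos (pyOnesPos (pyBin32 (n : Int))) (i : Int)) (fun x => x) with
  | none =>
    have := (PySem.List.max?_eq_none_iff _ _).mp hm
    rw [this] at hmem
    exact absurd hmem List.not_mem_nil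
  | some M =>
    have hle := PySem.List.max?_isMax hm _ hmem
    have hM8 : ¬ M < 8 := by
      have : (8 : Int) ≤ (((p + i) % 32 : Nat) : Int) := by exact_mod_cast by omega
      omega
    simp only [aStep]
    rw [hm]
    simp [hM8]

theorem gA_fit {n i₀ : Nat} (h256 : 256 ≤ n) (h2 : n < 2 ^ 32) (hi : i₀ ≤ 30)
    (hfit : rot32 n i₀ < 256) (hmin : ∀ j, j < i₀ → ¬ rot32 n j < 256) :
    (∃ RRf : Nat, RRf ≤ 30 ∧ RRf % 2 = 0 ∧ rot32 n RRf < 256 ∧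
        (∀ e, e ≤ 31 → e % 2 = 0 → rot32 n e < 256 → e ≤ RRf) ∧
        aStep (pyOnesPos (pyBin32 (n : Int))) (pyBin32 (n : Int)) none i₀ =
          some (Sum.inl (((rot32 n RRf : Nat) : Int), ((RRf / 2 : Nat) : Int))))
    ∨ ((∀ e, e ≤ 31 → e % 2 = 0 → ¬ rot32 n e < 256) ∧
        aStep (pyOnesPos (pyBin32 (n : Int))) (pyBin32 (n : Int)) none i₀ =
          some (Sum.inr ())) := by
  have hfB : fitsB n i₀ := (rot32_lt256_iff h2 (by omega)).mp hfit
  obtain ⟨pw, hpw, hbw⟩ : ∃ p, p < 32 ∧ n.testBit p = true := by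
    obtain ⟨i, hbit, _⟩ := Nat.exists_most_significant_bit (show n ≠ 0 by omega)
    refine ⟨i, ?_, hbit⟩
    by_contra h
    rw [Nat.testBit_lt_two_pow (lt_of_lt_of_le h2 (Nat.pow_le_pow_right (by omega) (by omega)))] at hbit
    exact Bool.false_ne_true hbit
  cases hm : PySem.List.max? (pyRotLeftPos (pyOnesPos (pyBin32 (n : Int))) (i₀ : Int)) (fun x => x) with
  | none =>
    have := (PySem.List.max?_eq_none_iff _ _).mp hm
    have hmem := mem_rotated (i := i₀) hpw hbw
    rw [this] at hmem
    exact absurd hmem List.not_mem_nil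
  | some M =>
    have hMmem := PySem.List.max?_mem hm
    have hMmax := PySem.List.max?_isMax hm
    obtain ⟨k, hk, hkM⟩ := List.mem_map.mp hMmem
    obtain ⟨ph, hph, hbh, hkp⟩ := mem_onesPos.mp hk
    subst hkp
    have hMn : M = (((ph + i₀) % 32 : Nat) : Int) := by
      rw [← hkM]
      have : ((ph : Int) + (i₀ : Int)) = (((ph + i₀ : Nat)) : Int) := by push_cast; ring
      rw [this]
      exact_mod_cast PySem.Int.mod_natCast (ph + i₀) 32
    set Mn := (ph + i₀) % 32 with hMndef
    have hMn8 : Mn < 8 := hfB ph hph hbh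
    have hmaxn : ∀ p, p < 32 → n.testBit p = true → (p + i₀) % 32 ≤ Mn := by
      intro p hp hbit
      have := hMmax _ (mem_rotated (i := i₀) hp hbit)
      rw [hMn] at this
      exact_mod_cast this
    set RR := i₀ + (7 - Mn) with hRRdef
    have hfitRR : fitsB n RR := by
      intro p hp hbit
      have := hmaxn p hp hbit
      omega
    have hRR31 : RR ≤ 31 := by
      by_contra h32
      have hfitRR' : fitsB n (RR - 32) := by
        intro p hp hbit
        have := hfitRR p hp hbit
        omega
      have hlt : rot32 n (RR - 32) < 256 := (rot32_lt256_iff h2 (by omega)).mpr hfitRR'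
      exact hmin (RR - 32) (by omega) hlt
    have hnotRR1 : ¬ fitsB n (RR + 1) := by
      intro hf
      have h1 := hf ph hph hbh
      have h2' : (ph + i₀) % 32 = Mn := rfl
      omega
    have habove : ∀ r, RR < r → r ≤ 31 → ¬ rot32 n r < 256 := by
      intro r h1 hr2 hf'
      have hfr : fitsB n r := (rot32_lt256_iff h2 (by omega)).mp hf'
      by_cases hreq : r = RR + 1
      · exact hnotRR1 (hreq ▸ hfr)
      · exact hnotRR1 (contig h256 h2 hfB hfr (by omega) (by omega) (by omega))
    simp only [aStep]
    rw [hm]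
    dsimp only
    have hM8 : M < 8 := by rw [hMn]; exact_mod_cast hMn8
    rw [if_pos hM8]
    have hrotReal : (i₀ : Int) + (7 - M) = ((RR : Nat) : Int) := by
      rw [hMn, hRRdef]; push_cast; omega
    rw [hrotReal]
    have hmod2 : PySem.Int.mod ((RR : Nat) : Int) 2 = ((RR % 2 : Nat) : Int) := by
      have := PySem.Int.mod_natCast RR 2
      rw [show ((2 : Nat) : Int) = (2 : Int) from rfl] at this
      exact this
    by_cases hodd : RR % 2 = 1
    · rw [hmod2, hodd]
      simp only [Nat.cast_one, beq_self_eq_true, if_true]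
      by_cases hm7 : Mn < 7
      · have hRRpos : 1 ≤ RR := by omega
        have hfit1 : fitsB n (RR - 1) := by
          intro p hp hbit
          have := hmaxn p hp hbit
          omega
        have hlt1 : rot32 n (RR - 1) < 256 := (rot32_lt256_iff h2 (by omega)).mpr hfit1
        have hM7 : M < 7 := by rw [hMn]; exact_mod_cast hm7
        rw [if_pos hM7]
        left
        refine ⟨RR - 1, by omega, by omega, hlt1, ?_, ?_⟩
        · intro e he hev hfe
          have : ¬ RR < e := fun hgt => habove e hgt he hfe
          omega
        · have hc : ((RR : Nat) : Int) - 1 = (((RR - 1 : Nat)) : Int) := by push_cast; omega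
          rw [hc, val_eq h2 (by omega) hlt1]
          have := PySem.Int.floordiv_natCast (RR - 1) 2
          rw [show ((2 : Nat) : Int) = (2 : Int) from rfl] at this
          rw [this]
      · have hM7 : ¬ M < 7 := by
          rw [hMn]
          have : (7 : Int) ≤ ((Mn : Nat) : Int) := by exact_mod_cast by omega
          omega
        rw [if_neg hM7]
        right
        refine ⟨?_, rfl⟩
        intro e he hev hfe
        have h1 : ¬ RR < e := fun hgt => habove e hgt he hfe
        have h2' : ¬ e < i₀ := fun hlt => hmin e hlt hfe
        have : RR = i₀ := by omega
        omega
    · rw [hmod2]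
      have heq : RR % 2 = 0 := by omega
      rw [heq]
      simp only [Nat.cast_zero]
      rw [if_neg (by simp)]
      left
      refine ⟨RR, by omega, heq, (rot32_lt256_iff h2 (by omega)).mpr hfitRR, ?_, ?_⟩
      · intro e he hev hfe
        have : ¬ RR < e := fun hgt => habove e hgt he hfe
        omega
      · rw [val_eq h2 (by omega) ((rot32_lt256_iff h2 (by omega)).mpr hfitRR)]
        have := PySem.Int.floordiv_natCast RR 2
        rw [show ((2 : Nat) : Int) = (2 : Int) from rfl] at this
        rw [this]

-- B's downward even scan, as used in altGo
theorem bfind_some (n RRf : Nat) (hR : RRf ≤ 30) (hev : RRf % 2 = 0) (hfit : rot32 n RRf < 256)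
    (hmax : ∀ e, e ≤ 31 → e % 2 = 0 → rot32 n e < 256 → e ≤ RRf) :
    (List.range 16).findSome? (fun k =>
        let rotReal := 30 - 2 * k
        let val := rot32 n rotReal
        if val < 256 then some ((val : Int), ((rotReal / 2 : Nat) : Int), false) else none)
      = some (((rot32 n RRf : Nat) : Int), ((RRf / 2 : Nat) : Int), false) := by
  refine findSome?_range_first _ 16 ((30 - RRf) / 2) _ (by omega) ?_ ?_
  · intro j hj
    have he : 30 - 2 * j > RRf := by omega
    have : ¬ rot32 n (30 - 2 * j) < 256 := by
      intro hf
      have := hmax (30 - 2 * j) (by omega) (by omega) hf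
      omega
    simp only []
    rw [if_neg this]
  · have hrr : 30 - 2 * ((30 - RRf) / 2) = RRf := by omega
    simp only [hrr]
    rw [if_pos hfit]

theorem bfind_none (n : Nat) (h : ∀ e, e ≤ 31 → e % 2 = 0 → ¬ rot32 n e < 256) :
    (List.range 16).findSome? (fun k =>
        let rotReal := 30 - 2 * k
        let val := rot32 n rotReal
        if val < 256 then some ((val : Int), ((rotReal / 2 : Nat) : Int), false) else none)
      = none := by
  refine findSome?_range_none _ 16 (fun j hj => ?_)
  simp only []
  rw [if_neg (h (30 - 2 * j) (by omega) (by omega))]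

-- ===== the inverse of an odd-only-fit immediate is never even-encodable =====

-- 'no even rotation of m leaves a value < 256', as a computed check over the 16 even counts
def oddOnly (m : Nat) : Bool := (List.range 16).all fun k => !(rot32 m (30 - 2 * k) < 256)

theorem oddOnly_iff (m : Nat) :
    oddOnly m = true ↔ ∀ e, e ≤ 31 → e % 2 = 0 → ¬ rot32 m e < 256 := by
  unfold oddOnly
  rw [List.all_eq_true]
  constructor
  · intro h e he hev hlt
    have h30 : 30 - 2 * ((30 - e) / 2) = e := by omega
    have := h ((30 - e) / 2) (List.mem_range.mpr (by omega))
    rw [h30] at this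
    simp [hlt] at this
  · intro h k hk
    rw [List.mem_range] at hk
    simp [h (30 - 2 * k) (by omega) (by omega)]

-- exhaustive check over every 8-bit pattern v and odd rotation 2j+1: if n = rot32 v (32-(2j+1))
-- is ≥ 256 and admits no even-rotation encoding, then neither its complement nor its negation
-- is zero, < 256, or even-rotation encodable
def decCheck : Bool :=
  (List.range 256).all fun v => (List.range 15).all fun j =>
    let n := rot32 v ((32 - (2 * j + 1)) % 32)
    !(decide (256 ≤ n) && oddOnly n) ||
      (decide (256 ≤ 4294967295 - n) && oddOnly (4294967295 - n) &&
       decide (256 ≤ 4294967296 - n) && oddOnly (4294967296 - n))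

set_option maxHeartbeats 4000000 in
set_option maxRecDepth 100000 in
theorem decCheck_true : decCheck = true := by decide

theorem decCheck_spec (v : Nat) (hv : v < 256) (j : Nat) (hj : j < 15)
    (h1 : 256 ≤ rot32 v ((32 - (2 * j + 1)) % 32))
    (h2 : oddOnly (rot32 v ((32 - (2 * j + 1)) % 32)) = true) :
    (256 ≤ 4294967295 - rot32 v ((32 - (2 * j + 1)) % 32) ∧
      oddOnly (4294967295 - rot32 v ((32 - (2 * j + 1)) % 32)) = true) ∧
    (256 ≤ 4294967296 - rot32 v ((32 - (2 * j + 1)) % 32) ∧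
      oddOnly (4294967296 - rot32 v ((32 - (2 * j + 1)) % 32)) = true) := by
  have h := decCheck_true
  unfold decCheck at h
  rw [List.all_eq_true] at h
  have h' := h v (List.mem_range.mpr hv)
  rw [List.all_eq_true] at h'
  have h'' := h' j (List.mem_range.mpr hj)
  simp only [Bool.or_eq_true, Bool.not_eq_true', Bool.and_eq_true, Bool.and_eq_false_iff,
    decide_eq_true_eq, decide_eq_false_iff_not, Bool.not_eq_true] at h''
  rcases h'' with h'' | ⟨⟨⟨ha, hb⟩, hc⟩, hd⟩
  · rcases h'' with h'' | h'' <;> simp_all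
  · exact ⟨⟨ha, hb⟩, ⟨hc, hd⟩⟩

theorem rot_inv (n : Nat) (h2 : n < 2 ^ 32) (r : Nat) (hr : r ≤ 31) :
    rot32 (rot32 n r) ((32 - r) % 32) = n := by
  apply Nat.eq_of_testBit_eq
  intro q
  by_cases hq : q < 32
  · rw [testBit_rot32 (rot32_lt_two_pow n r) (by omega) hq]
    have hidx : (q + 32 - (32 - r) % 32) % 32 < 32 := by omega
    rw [testBit_rot32 h2 hr hidx]
    congr 1
    omega
  · rw [Nat.testBit_lt_two_pow (lt_of_lt_of_le (rot32_lt_two_pow _ _)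
        (Nat.pow_le_pow_right (by omega) (by omega))),
      Nat.testBit_lt_two_pow (lt_of_lt_of_le h2 (Nat.pow_le_pow_right (by omega) (by omega)))]

theorem KEY (n : Nat) (h2 : n < 2 ^ 32) (h256 : 256 ≤ n) (r : Nat) (hr : r < 31)
    (hfit : rot32 n r < 256) (hnoeven : ∀ e, e ≤ 31 → e % 2 = 0 → ¬ rot32 n e < 256) :
    (256 ≤ 4294967295 - n ∧ (∀ e, e ≤ 31 → e % 2 = 0 → ¬ rot32 (4294967295 - n) e < 256)) ∧
    (256 ≤ 4294967296 - n ∧ (∀ e, e ≤ 31 → e % 2 = 0 → ¬ rot32 (4294967296 - n) e < 256)) := by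
  have hrodd : r % 2 = 1 := by
    rcases Nat.mod_two_eq_zero_or_one r with h | h
    · exact absurd hfit (hnoeven r (by omega) h)
    · exact h
  have hj : 2 * ((r - 1) / 2) + 1 = r := by omega
  have hinv : rot32 (rot32 n r) ((32 - r) % 32) = n := rot_inv n h2 r (by omega)
  have hspec := decCheck_spec (rot32 n r) hfit ((r - 1) / 2) (by omega)
  rw [hj, hinv] at hspec
  have := hspec h256 ((oddOnly_iff n).mpr hnoeven)
  exact ⟨⟨this.1.1, (oddOnly_iff _).mp this.1.2⟩, ⟨this.2.1, (oddOnly_iff _).mp this.2.2⟩⟩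

-- the combined for-loop facts: A's scan and B's scan agree case by case
theorem bigmain (n : Nat) (h256 : 256 ≤ n) (h2 : n < 2 ^ 32) :
    (∃ val rot : Int,
        (List.range 31).findSome? (fun i => aStep (pyOnesPos (pyBin32 (n : Int))) (pyBin32 (n : Int)) none i)
          = some (Sum.inl (val, rot)) ∧
        (List.range 16).findSome? (fun k =>
            let rotReal := 30 - 2 * k
            let val := rot32 n rotReal
            if val < 256 then some ((val : Int), ((rotReal / 2 : Nat) : Int), false) else none)
          = some (val, rot, false))
    ∨ ((List.range 31).findSome? (fun i => aStep (pyOnesPos (pyBin32 (n : Int))) (pyBin32 (n : Int)) none i)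
          = some (Sum.inr ()) ∧
        (List.range 16).findSome? (fun k =>
            let rotReal := 30 - 2 * k
            let val := rot32 n rotReal
            if val < 256 then some ((val : Int), ((rotReal / 2 : Nat) : Int), false) else none)
          = none ∧
        (∃ r, r < 31 ∧ rot32 n r < 256) ∧
        (∀ e, e ≤ 31 → e % 2 = 0 → ¬ rot32 n e < 256))
    ∨ ((List.range 31).findSome? (fun i => aStep (pyOnesPos (pyBin32 (n : Int))) (pyBin32 (n : Int)) none i)
          = none ∧
        (List.range 16).findSome? (fun k =>
            let rotReal := 30 - 2 * k
            let val := rot32 n rotReal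
            if val < 256 then some ((val : Int), ((rotReal / 2 : Nat) : Int), false) else none)
          = none) := by
  by_cases hany : ∃ r, r < 31 ∧ rot32 n r < 256
  · have hw : ∃ r, r < 31 ∧ rot32 n r < 256 := hany
    classical
    set i₀ := Nat.find hw with hi₀def
    obtain ⟨hi₀31, hi₀fit⟩ := Nat.find_spec hw
    have hmin : ∀ j, j < i₀ → ¬ rot32 n j < 256 := by
      intro j hj hfj
      exact Nat.find_min hw hj ⟨by omega, hfj⟩
    have hgnone : ∀ j, j < i₀ → aStep (pyOnesPos (pyBin32 (n : Int))) (pyBin32 (n : Int)) none j = none :=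
      fun j hj => gA_none h256 h2 (by omega) (hmin j hj)
    rcases gA_fit h256 h2 (by omega) hi₀fit hmin with
      ⟨RRf, hR30, hRev, hRfit, hRmax, hstep⟩ | ⟨hnoeven, hstep⟩
    · left
      exact ⟨_, _, findSome?_range_first _ 31 i₀ _ hi₀31 hgnone hstep,
        bfind_some n RRf hR30 hRev hRfit hRmax⟩
    · right; left
      exact ⟨findSome?_range_first _ 31 i₀ _ hi₀31 hgnone hstep, bfind_none n hnoeven,
        ⟨i₀, hi₀31, hi₀fit⟩, hnoeven⟩
  · right; right
    push_neg at hany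
    refine ⟨findSome?_range_none _ 31 (fun j hj => gA_none h256 h2 (by omega) (by have := hany j hj; omega)), ?_⟩
    exact bfind_none n (fun e he hev hf => by have := hany e (by omega); omega)

theorem pyMask32_natCast (imm : Int) : pyMask32 imm = (((imm % 4294967296).toNat : Nat) : Int) := by
  unfold pyMask32
  rw [PySem.Int.mod_eq_emod_of_pos (by norm_num)]
  have h0 : 0 ≤ imm % 4294967296 := Int.emod_nonneg imm (by norm_num)
  omega

theorem toNat_mask_lt (imm : Int) : (imm % 4294967296).toNat < 2 ^ 32 := by
  have h1 : imm % 4294967296 < 4294967296 := Int.emod_lt_of_pos imm (by norm_num)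
  have h0 : 0 ≤ imm % 4294967296 := Int.emod_nonneg imm (by norm_num)
  omega

theorem A_eval (fa : Nat) (imm : Int) (mode : Option String) (ai : Bool) :
    immediateToBytecodeGo (fa + 1) imm mode ai =
      (if (imm % 4294967296).toNat = 0 then some (0, 0, false)
       else if (imm % 4294967296).toNat < 256 then some (((imm % 4294967296).toNat : Int), 0, false)
       else
         match (List.range 31).findSome?
             (fun i => aStep (pyOnesPos (pyBin32 (((imm % 4294967296).toNat : Nat) : Int)))
               (pyBin32 (((imm % 4294967296).toNat : Nat) : Int)) none i) with
         | some (Sum.inl (val, rot)) => some (val, rot, false)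
         | some (Sum.inr _) => none
         | none =>
           if ai then none
           else pyTryInvertGo (fun i m => immediateToBytecodeGo fa i m true)
             (((imm % 4294967296).toNat : Nat) : Int) mode) := by
  rw [show immediateToBytecodeGo (fa + 1) imm mode ai = (
    let imm' := pyMask32 imm
    if imm' == 0 then some (0, 0, false)
    else if imm' < 256 then some (imm', 0, false)
    else if imm' < 0 then
      (if ai then none
       else pyTryInvertGo (fun i m => immediateToBytecodeGo fa i m true) imm' mode)
    else
      match (List.range 31).foldl (aStep (pyOnesPos (pyBin32 imm')) (pyBin32 imm')) none with
      | some (Sum.inl (val, rot)) => some (val, rot, false)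
      | some (Sum.inr _) => none
      | none =>
        if ai then none
        else pyTryInvertGo (fun i m => immediateToBytecodeGo fa i m true) imm' mode) from rfl]
  simp only []
  rw [pyMask32_natCast, foldl_aStep_eq]
  set n := (imm % 4294967296).toNat with hndef
  by_cases hn0 : n = 0
  · simp [hn0]
  · rw [if_neg (show ¬((n : Int) == 0) = true by simp [hn0]), if_neg hn0]
    by_cases hn256 : n < 256
    · rw [if_pos (show ((n : Int)) < 256 by exact_mod_cast hn256), if_pos hn256]
    · rw [if_neg (show ¬((n : Int)) < 256 by exact_mod_cast hn256), if_neg hn256,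
        if_neg (show ¬((n : Int)) < 0 by push_cast; omega)]

theorem B_eval (fb : Nat) (imm : Int) (mode : Option String) (ai : Bool) :
    altGo (fb + 1) imm mode ai =
      (if (imm % 4294967296).toNat = 0 then some (0, 0, false)
       else if (imm % 4294967296).toNat < 256 then some (((imm % 4294967296).toNat : Int), 0, false)
       else
         match (List.range 16).findSome? (fun k =>
             let rotReal := 30 - 2 * k
             let val := rot32 (imm % 4294967296).toNat rotReal
             if val < 256 then some ((val : Int), ((rotReal / 2 : Nat) : Int), false) else none) with
         | some res => some res
         | none =>
           if ai then none
           else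
             match (if mode == some "logical" then some (4294967295 - (imm % 4294967296).toNat)
                    else if mode == some "arithmetic" then some (4294967296 - (imm % 4294967296).toNat)
                    else none) with
             | none => none
             | some inv =>
               match altGo fb ((inv : Nat) : Int) mode true with
               | some t => some (t.1, t.2.1, true)
               | none => none) := by
  rw [show altGo (fb + 1) imm mode ai = (
    let n : Nat := (imm % 4294967296).toNat
    if n == 0 then some (0, 0, false)
    else if n < 256 then some ((n : Int), 0, false)
    else
      match (List.range 16).findSome? (fun k =>
          let rotReal := 30 - 2 * k
          let val := rot32 n rotReal
          if val < 256 then some ((val : Int), ((rotReal / 2 : Nat) : Int), false) else none) with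
      | some res => some res
      | none =>
        if ai then none
        else
          match (if mode == some "logical" then some (4294967295 - n)
                 else if mode == some "arithmetic" then some (4294967296 - n)
                 else none) with
          | none => none
          | some inv =>
            match altGo fb ((inv : Nat) : Int) mode true with
            | some t => some (t.1, t.2.1, true)
            | none => none) from rfl]
  simp only []
  set n := (imm % 4294967296).toNat with hndef
  by_cases hn0 : n = 0
  · simp [hn0]
  · rw [if_neg (show ¬(n == 0) = true by simp [hn0]), if_neg hn0]

-- B's inner call on a value with no even-rotation encoding returns none (alreadyinverted)
theorem inner_none (fb : Nat) (m : Nat) (mode : Option String) (h2 : m < 2 ^ 32) (h256 : 256 ≤ m)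
    (hnoeven : ∀ e, e ≤ 31 → e % 2 = 0 → ¬ rot32 m e < 256) :
    altGo fb ((m : Nat) : Int) mode true = none := by
  cases fb with
  | zero => rfl
  | succ f =>
    rw [B_eval]
    have hm : (((m : Nat) : Int) % 4294967296).toNat = m := by omega
    rw [hm]
    rw [if_neg (by omega), if_neg (by omega), bfind_none m hnoeven]
    rfl

theorem go_eq (fa fb : Nat)
    (hrec : ∀ (i : Int) (m : Option String), immediateToBytecodeGo fa i m true = altGo fb i m true) :
    ∀ (imm : Int) (mode : Option String) (ai : Bool),
      immediateToBytecodeGo (fa + 1) imm mode ai = altGo (fb + 1) imm mode ai := by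
  intro imm mode ai
  rw [A_eval, B_eval]
  set n := (imm % 4294967296).toNat with hndef
  have hn32 : n < 2 ^ 32 := toNat_mask_lt imm
  by_cases hn0 : n = 0
  · rw [if_pos hn0, if_pos hn0]
  · rw [if_neg hn0, if_neg hn0]
    by_cases hn256 : n < 256
    · rw [if_pos hn256, if_pos hn256]
    · rw [if_neg hn256, if_neg hn256]
      have h256 : 256 ≤ n := by omega
      rcases bigmain n h256 hn32 with
        ⟨val, rot, hA, hB⟩ | ⟨hA, hB, ⟨r, hr, hfit⟩, hnoeven⟩ | ⟨hA, hB⟩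
      · rw [hA, hB]
      · -- A breaks out with 'return None'; B's even scan fails and its inverted retry
        -- also fails, because the inverse admits no even-rotation encoding (KEY)
        rw [hA, hB]
        have hkey := KEY n hn32 h256 r hr hfit hnoeven
        cases ai with
        | true => rfl
        | false =>
          simp only [Bool.false_eq_true, if_false]
          cases mode with
          | none => rfl
          | some m =>
            by_cases hm : m = "logical"
            · subst hm
              rw [show (some "logical" == some "logical") = true from rfl]
              simp only [if_pos]
              rw [inner_none fb (4294967295 - n) (some "logical") (by omega) hkey.1.1 hkey.1.2]
            · rw [show ((some m == some "logical") = false) by simp [hm]]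
              simp only [Bool.false_eq_true, if_false]
              by_cases hm2 : m = "arithmetic"
              · subst hm2
                rw [show (some "arithmetic" == some "arithmetic") = true from rfl]
                simp only [if_pos]
                rw [inner_none fb (4294967296 - n) (some "arithmetic") (by omega) hkey.2.1 hkey.2.2]
              · rw [show ((some m == some "arithmetic") = false) by simp [hm2]]
                rfl
      · rw [hA, hB]
        cases ai with
        | true => rfl
        | false =>
          simp only [Bool.false_eq_true, if_false]
          cases mode with
          | none => rfl
          | some m =>
            simp only [pyTryInvertGo]
            by_cases hm : m = "logical"
            · subst hm
              rw [if_pos (by rfl)]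
              have hinv : pyMask32 (-((n : Nat) : Int) - 1) = (((4294967295 - n : Nat)) : Int) := by
                rw [pyMask32_natCast]
                have h0 : 0 ≤ (-((n : Nat) : Int) - 1) % 4294967296 := Int.emod_nonneg _ (by norm_num)
                push_cast [Nat.cast_sub (by omega : n ≤ 4294967295)]
                omega
              rw [hinv, hrec]
              rw [show (some "logical" == some "logical") = true from rfl]
              simp only [if_pos]
              cases altGo fb (((4294967295 - n : Nat)) : Int) (some "logical") true with
              | none => rfl
              | some t => rcases t with ⟨a, b, c⟩; rfl
            · rw [if_neg (by simpa using hm)]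
              by_cases hm2 : m = "arithmetic"
              · subst hm2
                rw [if_pos (by rfl)]
                have hinv : pyMask32 (-((n : Nat) : Int)) = (((4294967296 - n : Nat)) : Int) := by
                  rw [pyMask32_natCast]
                  push_cast [Nat.cast_sub (by omega : n ≤ 4294967296)]
                  omega
                rw [hinv, hrec]
                rw [show (some "arithmetic" == some "logical") = false from rfl]
                simp only [Bool.false_eq_true, if_false]
                rw [show (some "arithmetic" == some "arithmetic") = true from rfl]
                simp only [if_pos]
                cases altGo fb (((4294967296 - n : Nat)) : Int) (some "arithmetic") true with
                | none => rfl
                | some t => rcases t with ⟨a, b, c⟩; rfl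
              · rw [if_neg (by simpa using hm2)]
                have hb1 : (some m == some "logical") = false := by simp [hm]
                have hb2 : (some m == some "arithmetic") = false := by simp [hm2]
                rw [hb1, hb2]
                rfl

theorem core_equiv : ∀ (ai : Bool) (imm : Int) (mode : Option String),
    immediateToBytecode imm mode ai = immediateToBytecode_alt imm mode ai := by
  intro ai imm mode
  show immediateToBytecodeGo 2 imm mode ai = altGo 2 imm mode ai
  exact go_eq 1 1 (fun i m => go_eq 0 0 (fun _ _ => rfl) i m true) imm mode ai

-- ===== VERDICT (by name: the statement is the Claim_ definition above) =====
theorem immediateToBytecode_spec : Claim_equal_immediateToBytecode := by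
  intro imm mode ai _ _
  unfold Spec_immediateToBytecode
  exact core_equiv ai imm mode
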